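-- pv_equiv track=rewrite | github.com/adpartin/pdx-histo | src/sf_utils.py | get_categories_from_manifest
-- ===== SOURCE A (Python) =====
-- def get_categories_from_manifest(tfrecords, manifest, outcomes, MODEL_TYPE="categorical"):
--     """ ... """
--     categories = {}
--
--     for filename in tfrecords:
--         smp = filename.split("/")[-1][:-10]
--
--         # Determine total number of tiles available in TFRecord
--         tiles = manifest[filename]["total"]
--
--         # Get the category of the current sample
--         category = outcomes[smp]["outcome"] if MODEL_TYPE == "categorical" else 1
--
--         if category not in categories.keys():
--             categories.update({category: {"num_samples": 1,
--                                           "num_tiles": tiles}})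
--         else:
--             categories[category]["num_samples"] += 1
--             categories[category]["num_tiles"] += tiles
--         # num_tiles += [tiles]
--
--     return categories
-- ===== SOURCE B (Python) =====
-- def get_categories_from_manifest(tfrecords, manifest, outcomes, MODEL_TYPE="categorical"):
--     """Same aggregation, different decomposition: first flatten the manifest to a
--     list of (category, tiles) pairs (in original order, so any KeyError fires
--     identically), then build the result per distinct category (first-encounter
--     order) from whole-list scans instead of incremental per-element updates."""
--     pairs = []
--     for filename in tfrecords:
--         smp = filename.split("/")[-1][:-10]
--         tiles = manifest[filename]["total"]
--         category = outcomes[smp]["outcome"] if MODEL_TYPE == "categorical" else 1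
--         pairs.append((category, tiles))
--     cats = list(dict.fromkeys(c for c, _ in pairs))
--     result = {}
--     for c in cats:
--         grp = [t for k, t in pairs if k == c]
--         result[c] = {"num_samples": len(grp), "num_tiles": sum(grp)}
--     return result
-- ===== Notes on version B (the rewrite author's own statement) =====
-- stated objective: alternative
-- what changed: A accumulates per-category counters incrementally in a dict while scanning; B first flattens the manifest to a (category, tiles) pair list, then builds the result per distinct category (first-encounter order) from whole-list scans (len/sum of a filtered group).
import Mathlib
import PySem

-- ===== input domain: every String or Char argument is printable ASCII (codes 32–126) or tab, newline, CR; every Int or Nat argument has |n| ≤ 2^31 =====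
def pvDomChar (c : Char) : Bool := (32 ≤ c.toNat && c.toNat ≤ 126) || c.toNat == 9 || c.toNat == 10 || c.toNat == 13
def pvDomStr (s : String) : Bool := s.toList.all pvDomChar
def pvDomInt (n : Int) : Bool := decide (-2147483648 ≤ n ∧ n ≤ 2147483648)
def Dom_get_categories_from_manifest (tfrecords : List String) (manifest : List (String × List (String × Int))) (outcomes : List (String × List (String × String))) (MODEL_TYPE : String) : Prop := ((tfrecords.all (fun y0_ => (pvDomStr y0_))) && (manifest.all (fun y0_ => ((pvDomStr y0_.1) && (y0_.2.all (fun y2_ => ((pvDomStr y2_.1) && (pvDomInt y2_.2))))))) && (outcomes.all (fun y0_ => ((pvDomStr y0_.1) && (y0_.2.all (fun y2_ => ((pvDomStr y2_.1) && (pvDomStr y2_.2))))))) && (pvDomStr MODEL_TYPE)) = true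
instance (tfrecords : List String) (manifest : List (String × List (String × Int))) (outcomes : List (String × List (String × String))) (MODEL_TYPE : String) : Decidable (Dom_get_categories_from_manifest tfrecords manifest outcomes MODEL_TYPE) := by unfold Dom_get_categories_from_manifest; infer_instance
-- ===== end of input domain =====

-- B replaces A's incremental per-element dict updates by a flatten-to-pairs pass followed by
-- per-category whole-list scans (first-encounter key order kept); objective: alternative decomposition.
-- Equality proved on Pre_ (MODEL_TYPE = "categorical" and every lookup present; see Pre_'s comment).

-- ===== PORT A =====
-- shared input-reading helpers (used verbatim by both ports: both Pythons compute smp/tiles/category identically)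
-- smp = filename.split("/")[-1][:-10]
def pvSmp (filename : String) : String :=
  PySem.Str.slice (PySem.List.pyGetD ((PySem.Str.split? filename "/").getD []) (-1) "") none (some (-10))
-- tiles = manifest[filename]["total"]  (first-match assoc lookup = dict lookup; defaults unreachable under Pre_)
def pvTiles (manifest : List (String × List (String × Int))) (filename : String) : Int :=
  (List.lookup "total" ((List.lookup filename manifest).getD [])).getD 0
-- category = outcomes[smp]["outcome"] if MODEL_TYPE == "categorical" else 1
-- (the else-branch's Python value is the int 1, not a String; Pre_ excludes MODEL_TYPE ≠ "categorical")
def pvCat (outcomes : List (String × List (String × String))) (MODEL_TYPE : String) (filename : String) : String :=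
  if MODEL_TYPE = "categorical" then
    (List.lookup "outcome" ((List.lookup (pvSmp filename) outcomes).getD [])).getD ""
  else "1"

-- A's loop body: if category not in categories.keys(): insert fresh; else two in-place += updates
def pvStepA (categories : PySem.Dict String (PySem.Dict String Int)) (p : String × Int) :
    PySem.Dict String (PySem.Dict String Int) :=
  if categories.contains p.1 = false then
    categories.insert p.1 (PySem.Dict.mk [("num_samples", (1 : Int)), ("num_tiles", p.2)])
  else
    (categories.modify p.1 (PySem.Dict.mk [])
        (fun inner => inner.modify "num_samples" 0 (· + 1))).modify p.1 (PySem.Dict.mk [])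
        (fun inner => inner.modify "num_tiles" 0 (· + p.2))

def get_categories_from_manifest (tfrecords : List String) (manifest : List (String × List (String × Int))) (outcomes : List (String × List (String × String))) (MODEL_TYPE : String) : List (String × List (String × Int)) :=
  (tfrecords.foldl
      (fun categories filename =>
        pvStepA categories (pvCat outcomes MODEL_TYPE filename, pvTiles manifest filename))
      PySem.Dict.empty).items.map (fun q => (q.1, q.2.items))

-- ===== PORT B =====
-- grp = [t for k, t in pairs if k == c]
def pvGroup (pairs : List (String × Int)) (c : String) : List Int :=
  (pairs.filter (fun p => p.1 == c)).map (·.2)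

-- result built per distinct category (dict.fromkeys order = first occurrences)
def pvBuildB (pairs : List (String × Int)) : List (String × List (String × Int)) :=
  (PySem.List.dedup (pairs.map (·.1))).map
    (fun c => (c, [("num_samples", ((pvGroup pairs c).length : Int)),
                   ("num_tiles", (pvGroup pairs c).sum)]))

def get_categories_from_manifest_alt (tfrecords : List String) (manifest : List (String × List (String × Int))) (outcomes : List (String × List (String × String))) (MODEL_TYPE : String) : List (String × List (String × Int)) :=
  pvBuildB (tfrecords.map (fun f => (pvCat outcomes MODEL_TYPE f, pvTiles manifest f)))

-- ===== PRECONDITION & SPEC =====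
-- Pre_ excludes (a) non-empty tfrecords with MODEL_TYPE ≠ "categorical", where A returns a dict
-- keyed by the int 1 — not a value of the declared String-keyed type; (b) inputs where a
-- manifest/outcomes lookup is missing, where A raises KeyError.
def Pre_get_categories_from_manifest (tfrecords : List String) (manifest : List (String × List (String × Int))) (outcomes : List (String × List (String × String))) (MODEL_TYPE : String) : Prop :=
  (tfrecords = [] ∨ MODEL_TYPE = "categorical") ∧
  ∀ f ∈ tfrecords,
    (List.lookup f manifest).isSome = true ∧
    (List.lookup "total" ((List.lookup f manifest).getD [])).isSome = true ∧
    (List.lookup (pvSmp f) outcomes).isSome = true ∧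
    (List.lookup "outcome" ((List.lookup (pvSmp f) outcomes).getD [])).isSome = true
instance (tfrecords : List String) (manifest : List (String × List (String × Int))) (outcomes : List (String × List (String × String))) (MODEL_TYPE : String) : Decidable (Pre_get_categories_from_manifest tfrecords manifest outcomes MODEL_TYPE) := by unfold Pre_get_categories_from_manifest; infer_instance

def pvWitness_get_categories_from_manifest : List String × (List (String × List (String × Int))) × (List (String × List (String × String))) × String :=
  (["a.tfrecords"], [("a.tfrecords", [("total", 3)])], [("a", [("outcome", "c1")])], "categorical")

def Spec_get_categories_from_manifest (tfrecords : List String) (manifest : List (String × List (String × Int))) (outcomes : List (String × List (String × String))) (MODEL_TYPE : String) (out : List (String × List (String × Int))) : Prop := out = get_categories_from_manifest_alt tfrecords manifest outcomes MODEL_TYPE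
instance (tfrecords : List String) (manifest : List (String × List (String × Int))) (outcomes : List (String × List (String × String))) (MODEL_TYPE : String) (out : List (String × List (String × Int))) : Decidable (Spec_get_categories_from_manifest tfrecords manifest outcomes MODEL_TYPE out) := by unfold Spec_get_categories_from_manifest; infer_instance

-- ===== CLAIM (what is proved, stated in full; the proofs are below) =====
def Claim_equal_get_categories_from_manifest : Prop := ∀ (tfrecords : List String) (manifest : List (String × List (String × Int))) (outcomes : List (String × List (String × String))) (MODEL_TYPE : String), Dom_get_categories_from_manifest tfrecords manifest outcomes MODEL_TYPE → Pre_get_categories_from_manifest tfrecords manifest outcomes MODEL_TYPE → Spec_get_categories_from_manifest tfrecords manifest outcomes MODEL_TYPE (get_categories_from_manifest tfrecords manifest outcomes MODEL_TYPE)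

-- ===== LEMMAS AND PROOFS =====

theorem pvWitness_ok :
    Dom_get_categories_from_manifest pvWitness_get_categories_from_manifest.1 pvWitness_get_categories_from_manifest.2.1 pvWitness_get_categories_from_manifest.2.2.1 pvWitness_get_categories_from_manifest.2.2.2 ∧
    Pre_get_categories_from_manifest pvWitness_get_categories_from_manifest.1 pvWitness_get_categories_from_manifest.2.1 pvWitness_get_categories_from_manifest.2.2.1 pvWitness_get_categories_from_manifest.2.2.2 := by
  decide

-- the per-category inner dict B's scans describe
def pvEntryB (pairs : List (String × Int)) (c : String) : PySem.Dict String Int :=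
  PySem.Dict.mk [("num_samples", ((pvGroup pairs c).length : Int)),
                 ("num_tiles", (pvGroup pairs c).sum)]

theorem pvDedup_append_singleton {α : Type} [BEq α] [LawfulBEq α] (l : List α) (x : α) :
    PySem.List.dedup (l ++ [x]) =
      if x ∈ l then PySem.List.dedup l else PySem.List.dedup l ++ [x] := by
  have h : PySem.List.dedup (l ++ [x]) = PySem.Set.add (PySem.List.dedup l) x := by
    simp [PySem.Set.ofList_eq_foldl, List.foldl_append]
  rw [h]
  by_cases hx : x ∈ l
  · simp [PySem.Set.add, PySem.Set.contains, hx, PySem.Set.mem_ofList]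
  · simp [PySem.Set.add, PySem.Set.contains, hx, PySem.Set.mem_ofList]
theorem pvGroup_append_singleton (ps : List (String × Int)) (p : String × Int) (c : String) :
    pvGroup (ps ++ [p]) c = pvGroup ps c ++ (if p.1 = c then [p.2] else []) := by
  by_cases h : p.1 = c <;> simp [pvGroup, List.filter_append, h]
theorem pvContains_mk_map (K : List String) (g : String → PySem.Dict String Int) (x : String) :
    (PySem.Dict.mk (K.map (fun c => (c, g c)))).contains x = decide (x ∈ K) := by
  simp only [PySem.Dict.contains, List.any_map]
  show (K.any fun y => y == x) = _
  rw [List.any_beq']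
  exact List.contains_eq_mem x K
theorem pvInner (a b t : Int) :
    ((PySem.Dict.mk [("num_samples",a),("num_tiles",b)]).modify "num_samples" 0 (· + 1)).modify
        "num_tiles" 0 (· + t) = PySem.Dict.mk [("num_samples",a+1),("num_tiles",b+t)] := by
  simp [PySem.Dict.modify, PySem.Dict.insert, PySem.Dict.contains, PySem.Dict.getD, PySem.Dict.get?]

theorem pvStepA_build (ps : List (String × Int)) (p : String × Int) :
    pvStepA (PySem.Dict.mk ((PySem.List.dedup (ps.map (·.1))).map (fun c => (c, pvEntryB ps c)))) p =
      PySem.Dict.mk ((PySem.List.dedup ((ps ++ [p]).map (·.1))).map (fun c => (c, pvEntryB (ps ++ [p]) c))) := by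
  have hmapapp : (ps ++ [p]).map (·.1) = ps.map (·.1) ++ [p.1] := by simp
  rw [hmapapp, pvDedup_append_singleton]
  unfold pvStepA
  rw [pvContains_mk_map]
  by_cases hx : p.1 ∈ ps.map (·.1)
  · -- existing key: two in-place updates
    rw [if_pos hx, if_neg (by simp [hx])]
    have hmem : (p.1, pvEntryB ps p.1) ∈ (PySem.List.dedup (ps.map (·.1))).map (fun c => (c, pvEntryB ps c)) :=
      List.mem_map_of_mem ((PySem.List.mem_dedup _ _).2 hx)
    have hnodup : (PySem.Dict.mk ((PySem.List.dedup (ps.map (·.1))).map (fun c => (c, pvEntryB ps c)))).keys.Nodup := by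
      show (List.map _ _).Nodup
      rw [List.map_map]
      have h2 : ((fun x => x.1) ∘ fun c => (c, pvEntryB ps c)) = id := rfl
      rw [h2, List.map_id]
      exact PySem.List.nodup_dedup _
    have hget : (PySem.Dict.mk ((PySem.List.dedup (ps.map (·.1))).map (fun c => (c, pvEntryB ps c)))).getD p.1 (PySem.Dict.mk []) = pvEntryB ps p.1 :=
      PySem.Dict.getD_of_mem_items _ hmem hnodup _
    rw [PySem.Dict.modify, PySem.Dict.modify, PySem.Dict.getD_insert_self, hget]
    rw [PySem.Dict.insert_insert_self, pvEntryB, pvInner]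
    apply PySem.Dict.ext
    rw [PySem.Dict.items_insert_of_contains _ _ (by rw [pvContains_mk_map]; simpa using hx)]
    show (List.map _ (List.map _ _)) = _
    rw [List.map_map]
    apply List.map_congr_left
    intro c hc
    by_cases hcp : c = p.1
    · subst hcp
      simp only [Function.comp_def, beq_self_eq_true, if_true]
      rw [pvEntryB, pvGroup_append_singleton, if_pos rfl]
      simp only [Prod.mk.injEq, PySem.Dict.mk.injEq, List.cons.injEq, List.length_append,
        List.sum_append, List.length_cons, List.length_nil, List.sum_cons, List.sum_nil, true_and,
        and_true]
      constructor
      · push_cast; ring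
      · ring
    · show (if ((c, pvEntryB ps c).1 == p.1) = true then _ else _) = _
      rw [if_neg (by simp [hcp])]
      have hpc : ¬ p.1 = c := fun h => hcp h.symm
      have : pvEntryB (ps ++ [p]) c = pvEntryB ps c := by
        simp only [pvEntryB, pvGroup_append_singleton]
        simp [hpc]
      rw [this]
  · -- new key: fresh insert appended
    rw [if_neg hx, if_pos (by simp [hx])]
    apply PySem.Dict.ext
    rw [PySem.Dict.items_insert_of_not_contains _ _ (by rw [pvContains_mk_map]; simpa using hx)]
    show _ ++ _ = List.map _ (_ ++ [p.1])
    rw [List.map_append]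
    congr 1
    · apply List.map_congr_left
      intro c hc
      have hcp : p.1 ≠ c := by
        intro h
        exact hx (by rw [h]; exact (PySem.List.mem_dedup _ _).1 hc)
      have : pvEntryB (ps ++ [p]) c = pvEntryB ps c := by
        simp only [pvEntryB, pvGroup_append_singleton, if_neg hcp]
        simp
      rw [this]
    · have hfil : ps.filter (fun q => q.1 == p.1) = [] := by
        apply List.filter_eq_nil_iff.2
        intro q hq
        simp only [beq_iff_eq] at *
        intro h
        exact hx (by rw [← h]; exact List.mem_map_of_mem hq)
      have hnil : pvGroup ps p.1 = [] := by rw [pvGroup, hfil]; rfl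
      simp only [pvEntryB, pvGroup_append_singleton]
      simp [hnil]

theorem pvAccA_eq (pairs : List (String × Int)) :
    pairs.foldl pvStepA PySem.Dict.empty =
      PySem.Dict.mk ((PySem.List.dedup (pairs.map (·.1))).map (fun c => (c, pvEntryB pairs c))) := by
  induction pairs using List.reverseRecOn with
  | nil => rfl
  | append_singleton ps p ih =>
      rw [List.foldl_append, List.foldl_cons, List.foldl_nil, ih, pvStepA_build]

-- ===== VERDICT (by name: the statement is the Claim_ definition above) =====
theorem get_categories_from_manifest_spec : Claim_equal_get_categories_from_manifest := by
  intro tfrecords manifest outcomes MODEL_TYPE _dom _pre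
  unfold Spec_get_categories_from_manifest
  unfold get_categories_from_manifest get_categories_from_manifest_alt
  rw [← List.foldl_map]
  rw [pvAccA_eq]
  simp [pvBuildB, pvEntryB, List.map_map, Function.comp]
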